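-- pv_equiv track=rewrite | github.com/aquafastaghiggi/importadorexcel | python/process_excel.py | cluster_row_cells
-- ===== SOURCE A (Python) =====
-- def cluster_row_cells(cells, min_gap=4):
--     ordered = sorted(cells, key=lambda c: c["col_idx"])
--     clusters = []
--
--     for cell in ordered:
--         if not clusters:
--             clusters.append([cell])
--             continue
--
--         if cell["col_idx"] - clusters[-1][-1]["col_idx"] > min_gap:
--             clusters.append([cell])
--         else:
--             clusters[-1].append(cell)
--
--     return clusters
-- ===== SOURCE B (Python) =====
-- def cluster_row_cells(cells, min_gap=4):
--     # Boundaries-first decomposition: sort, compute the break positions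
--     # (indices where the column gap to the previous cell exceeds min_gap),
--     # then slice the sorted list at those boundaries.
--     ordered = sorted(cells, key=lambda c: c["col_idx"])
--     if not ordered:
--         return []
--     n = len(ordered)
--     bounds = [0] + [i for i in range(1, n)
--                     if ordered[i]["col_idx"] - ordered[i - 1]["col_idx"] > min_gap] + [n]
--     return [ordered[a:b] for a, b in zip(bounds, bounds[1:])]
-- ===== Notes on version B (the rewrite author's own statement) =====
-- stated objective: alternative
-- what changed: Replaces A's incremental append-to-last-cluster loop by a staged boundaries-first decomposition: after sorting, first compute the list of break indices where the column gap exceeds min_gap, then partition the sorted list by slicing it between consecutive boundaries.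
import Mathlib
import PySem

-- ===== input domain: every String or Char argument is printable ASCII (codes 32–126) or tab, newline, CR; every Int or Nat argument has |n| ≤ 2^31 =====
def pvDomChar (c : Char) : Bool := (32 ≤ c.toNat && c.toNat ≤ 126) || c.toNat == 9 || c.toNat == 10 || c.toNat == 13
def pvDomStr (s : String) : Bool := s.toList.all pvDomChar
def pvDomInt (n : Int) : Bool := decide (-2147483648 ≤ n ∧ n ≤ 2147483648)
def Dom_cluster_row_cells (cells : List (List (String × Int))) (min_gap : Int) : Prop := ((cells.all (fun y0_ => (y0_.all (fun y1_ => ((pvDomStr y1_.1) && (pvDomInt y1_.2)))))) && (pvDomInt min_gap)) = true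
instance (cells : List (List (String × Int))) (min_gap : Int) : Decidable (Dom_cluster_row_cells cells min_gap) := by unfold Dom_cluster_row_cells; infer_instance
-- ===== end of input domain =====

-- B partitions boundaries-first (break indices computed, then the sorted list is
-- sliced between consecutive boundaries) instead of A's incremental
-- append-to-last-cluster loop; same cost, alternative decomposition.


-- cell["col_idx"] on the dict represented by the association list `cell`
-- (Python dict semantics: duplicate keys overwritten, so PySem.Dict.ofList).
-- The default 0 is never reached on inputs satisfying Pre_ (key present);
-- on a missing key Python raises KeyError, excluded by Pre_.
def pvKey (cell : List (String × Int)) : Int :=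
  (PySem.Dict.ofList cell).getD "col_idx" 0

-- ===== PORT A =====
-- one iteration of A's for-loop over `ordered`, state = clusters
def pvStepA (g : Int) (clusters : List (List (List (String × Int)))) (cell : List (String × Int)) : List (List (List (String × Int))) :=
  if clusters = [] then clusters ++ [[cell]]
  else if pvKey cell - pvKey ((clusters.getLastD []).getLastD []) > g then clusters ++ [[cell]]
  else clusters.dropLast ++ [clusters.getLastD [] ++ [cell]]

def cluster_row_cells (cells : List (List (String × Int))) (min_gap : Int) : List (List (List (String × Int))) :=
  (PySem.List.sorted cells pvKey false).foldl (pvStepA min_gap) []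

-- ===== PORT B =====
-- Source B step for step: sort; early return [] on empty; the break-index list
-- comprehension over range(1, n) (both indices always in range, so the
-- pyGetD default [] is never read); bounds = [0] + breaks + [n]; the
-- slice comprehension over zip(bounds, bounds[1:]).
def cluster_row_cells_alt (cells : List (List (String × Int))) (min_gap : Int) : List (List (List (String × Int))) :=
  let ordered := PySem.List.sorted cells pvKey false
  if ordered = [] then []
  else
    let n : Int := ordered.length
    let bounds : List Int :=
      0 :: (PySem.List.pyRange 1 n 1).filter
            (fun i => decide (pvKey (PySem.List.pyGetD ordered i []) -
                              pvKey (PySem.List.pyGetD ordered (i - 1) []) > min_gap))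
         ++ [n]
    (bounds.zip bounds.tail).map (fun ab => PySem.List.slice ordered (some ab.1) (some ab.2))

-- ===== PRECONDITION & SPEC =====
-- Pre_ excludes exactly the inputs where some cell-dict lacks the key
-- "col_idx", on which the Python A raises KeyError.
def Pre_cluster_row_cells (cells : List (List (String × Int))) (min_gap : Int) : Prop :=
  ∀ cell ∈ cells, (PySem.Dict.ofList cell).contains "col_idx" = true
instance (cells : List (List (String × Int))) (min_gap : Int) : Decidable (Pre_cluster_row_cells cells min_gap) := by unfold Pre_cluster_row_cells; infer_instance

def pvWitness_cluster_row_cells : (List (List (String × Int))) × Int :=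
  ([[("col_idx", 1)], [("col_idx", 9), ("txt", 3)]], 4)

def Spec_cluster_row_cells (cells : List (List (String × Int))) (min_gap : Int) (out : List (List (List (String × Int)))) : Prop := out = cluster_row_cells_alt cells min_gap
instance (cells : List (List (String × Int))) (min_gap : Int) (out : List (List (List (String × Int)))) : Decidable (Spec_cluster_row_cells cells min_gap out) := by unfold Spec_cluster_row_cells; infer_instance

-- ===== CLAIM (what is proved, stated in full; the proofs are below) =====
def Claim_equal_cluster_row_cells : Prop := ∀ (cells : List (List (String × Int))) (min_gap : Int), Dom_cluster_row_cells cells min_gap → Pre_cluster_row_cells cells min_gap → Spec_cluster_row_cells cells min_gap (cluster_row_cells cells min_gap)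

-- ===== LEMMAS AND PROOFS =====

-- A-side lemmas (the fold equals the gap-grouping pvGrp) and B-side lemmas
-- (the boundaries-then-slice computation, modelled at Nat level by
-- pvBrkN/pvBoundsN/pvOutN, equals pvGrp too).

def pvGrp (g : Int) : List (List (String × Int)) → List (List (List (String × Int)))
  | [] => []
  | [c] => [[c]]
  | c :: c' :: rest =>
    if pvKey c' - pvKey c > g then [c] :: pvGrp g (c' :: rest)
    else match pvGrp g (c' :: rest) with
      | cl :: cls => (c :: cl) :: cls
      | [] => [[c]]
lemma pvGrp_head (g : Int) : ∀ (rest : List (List (String × Int))) (c : List (String × Int)),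
    ∃ t cls, pvGrp g (c :: rest) = (c :: t) :: cls := by
  intro rest
  induction rest with
  | nil => intro c; exact ⟨[], [], rfl⟩
  | cons c' rest' ih =>
    intro c
    obtain ⟨t, cls, h⟩ := ih c'
    by_cases hg : pvKey c' - pvKey c > g
    · exact ⟨[], pvGrp g (c' :: rest'), by simp [pvGrp, hg]⟩
    · exact ⟨c' :: t, cls, by simp [pvGrp, hg, h]⟩

lemma pvA_eq_grp_aux (g : Int) : ∀ (l : List (List (String × Int)))
    (cs : List (List (List (String × Int)))) (cl : List (List (String × Int)))
    (p : List (String × Int)) (t : List (List (String × Int)))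
    (cls : List (List (List (String × Int)))),
    pvGrp g (p :: l) = (p :: t) :: cls →
    l.foldl (pvStepA g) (cs ++ [cl ++ [p]]) = (cs ++ [cl ++ p :: t]) ++ cls := by
  intro l
  induction l with
  | nil =>
    intro cs cl p t cls h
    simp [pvGrp] at h
    obtain ⟨ht, hcls⟩ := h
    simp [ht, hcls]
  | cons x l' ih =>
    intro cs cl p t cls h
    rw [List.foldl_cons]
    have hstep_ne : cs ++ [cl ++ [p]] ≠ [] := by simp
    obtain ⟨t', cls', h'⟩ := pvGrp_head g l' x
    by_cases hg : pvKey x - pvKey p > g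
    · have hgrp : pvGrp g (p :: x :: l') = [p] :: pvGrp g (x :: l') := by
        simp [pvGrp, hg]
      rw [hgrp] at h
      obtain ⟨ht, hcls⟩ : t = [] ∧ cls = pvGrp g (x :: l') := by
        constructor <;> [skip; skip] <;> injection h with h1 h2 <;>
          first | (injection h1 with _ h1'; exact h1'.symm) | exact h2.symm
      have hstep : pvStepA g (cs ++ [cl ++ [p]]) x = (cs ++ [cl ++ [p]]) ++ [([] : List (List (String × Int))) ++ [x]] := by
        simp [pvStepA, hstep_ne, hg]
      rw [hstep, ih ((cs ++ [cl ++ [p]])) [] x t' cls' h']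
      simp [ht, hcls, h']
    · have hgrp : pvGrp g (p :: x :: l') = (p :: x :: t') :: cls' := by
        simp [pvGrp, hg, h']
      rw [hgrp] at h
      obtain ⟨ht, hcls⟩ : t = x :: t' ∧ cls = cls' := by
        constructor <;> injection h with h1 h2 <;>
          first | (injection h1 with _ h1'; exact h1'.symm) | exact h2.symm
      have hstep : pvStepA g (cs ++ [cl ++ [p]]) x = cs ++ [(cl ++ [p]) ++ [x]] := by
        simp [pvStepA, hstep_ne, hg]
      rw [hstep]
      have := ih cs (cl ++ [p]) x t' cls' h'
      simp at this ⊢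
      rw [this]
      simp [ht, hcls]

lemma pvA_eq_grp (g : Int) (l : List (List (String × Int))) :
    l.foldl (pvStepA g) [] = pvGrp g l := by
  cases l with
  | nil => rfl
  | cons p l' =>
    obtain ⟨t, cls, h⟩ := pvGrp_head g l' p
    rw [List.foldl_cons]
    have hstep : pvStepA g [] p = ([] : List (List (List (String × Int)))) ++ [([] : List (List (String × Int))) ++ [p]] := by
      simp [pvStepA]
    rw [hstep, pvA_eq_grp_aux g l' [] [] p t cls h, h]
    simp

def pvQ (g : Int) (l : List (List (String × Int))) (k : Nat) : Bool :=
  decide (pvKey (l.getD (k + 1) []) - pvKey (l.getD k []) > g)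
def pvBrkN (g : Int) (l : List (List (String × Int))) : List Nat :=
  (List.range (l.length - 1)).filter (pvQ g l)
def pvBoundsN (g : Int) (l : List (List (String × Int))) : List Nat :=
  0 :: ((pvBrkN g l).map (· + 1) ++ [l.length])
def pvOutN (g : Int) (l : List (List (String × Int))) : List (List (List (String × Int))) :=
  ((pvBoundsN g l).zip (pvBoundsN g l).tail).map (fun ab => (l.drop ab.1).take (ab.2 - ab.1))

lemma pvBrkN_cons₂ (g : Int) (c c' : List (String × Int)) (rest : List (List (String × Int))) :
    pvBrkN g (c :: c' :: rest) =
      (if pvQ g (c :: c' :: rest) 0 then [0] else []) ++ (pvBrkN g (c' :: rest)).map (· + 1) := by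
  unfold pvBrkN
  have hlen : (c :: c' :: rest).length - 1 = ((c' :: rest).length - 1) + 1 := by simp
  rw [hlen, List.range_succ_eq_map, List.filter_cons, List.filter_map]
  have hq : List.filter (pvQ g (c :: c' :: rest) ∘ Nat.succ) (List.range ((c' :: rest).length - 1))
      = List.filter (pvQ g (c' :: rest)) (List.range ((c' :: rest).length - 1)) := by
    apply List.filter_congr; intro k _
    simp [pvQ, Function.comp]
  rw [hq]
  split_ifs <;> simp

lemma pvZipShift (a : Nat) (bs : List Nat) :
    (((a :: bs).map (· + 1)).zip (bs.map (· + 1))) =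
      ((a :: bs).zip bs).map (fun ab => (ab.1 + 1, ab.2 + 1)) := by
  induction bs generalizing a with
  | nil => rfl
  | cons b bs' ih =>
    simp only [List.map_cons, List.zip_cons_cons, List.map_cons]
    have h := ih b
    simp only [List.map_cons] at h
    rw [h]

lemma pvOutN_eq_grp (g : Int) : ∀ (l : List (List (String × Int))), l ≠ [] →
    pvOutN g l = pvGrp g l := by
  intro l
  induction l with
  | nil => intro h; exact absurd rfl h
  | cons c l' ih =>
    intro _
    cases l' with
    | nil =>
      simp [pvOutN, pvBoundsN, pvBrkN, pvGrp]
    | cons c' rest =>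
      have hgapq : pvQ g (c :: c' :: rest) 0 = decide (pvKey c' - pvKey c > g) := by
        simp [pvQ]
      have hbz : pvBoundsN g (c' :: rest) = 0 :: (pvBoundsN g (c' :: rest)).tail := by
        simp [pvBoundsN]
      by_cases hg : pvKey c' - pvKey c > g
      · have hb : pvBoundsN g (c :: c' :: rest) = 0 :: (pvBoundsN g (c' :: rest)).map (· + 1) := by
          rw [show pvBoundsN g (c :: c' :: rest)
                = 0 :: ((pvBrkN g (c :: c' :: rest)).map (· + 1) ++ [(c' :: rest).length + 1]) from by simp [pvBoundsN],
              pvBrkN_cons₂, hgapq]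
          simp [hg, pvBoundsN, List.map_append]
        unfold pvOutN
        rw [hb, List.tail_cons]
        conv_lhs => rw [hbz, List.map_cons]
        rw [List.zip_cons_cons, List.map_cons]
        have hm : ((0:Nat) + 1) :: ((pvBoundsN g (c' :: rest)).tail.map (· + 1)) =
            ((0:Nat) :: (pvBoundsN g (c' :: rest)).tail).map (· + 1) := by simp
        rw [hm, pvZipShift, ← hbz, List.map_map]
        have hslices : ((pvBoundsN g (c' :: rest)).zip (pvBoundsN g (c' :: rest)).tail).map
              ((fun ab => ((c :: c' :: rest).drop ab.1).take (ab.2 - ab.1)) ∘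
                (fun ab : Nat × Nat => (ab.1 + 1, ab.2 + 1))) = pvOutN g (c' :: rest) := by
          unfold pvOutN
          apply List.map_congr_left
          intro ab _
          simp
        rw [hslices, ih (by simp)]
        simp [pvGrp, hg]
      · have hb : pvBoundsN g (c :: c' :: rest) =
            0 :: ((pvBoundsN g (c' :: rest)).tail.map (· + 1)) := by
          rw [show pvBoundsN g (c :: c' :: rest)
                = 0 :: ((pvBrkN g (c :: c' :: rest)).map (· + 1) ++ [(c' :: rest).length + 1]) from by simp [pvBoundsN],
              pvBrkN_cons₂, hgapq]
          simp [hg, pvBoundsN, List.map_append]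
        obtain ⟨b1, bt, hbt⟩ : ∃ b1 bt, (pvBoundsN g (c' :: rest)).tail = b1 :: bt := by
          cases htl : (pvBoundsN g (c' :: rest)).tail with
          | nil => simp [pvBoundsN] at htl
          | cons b1 bt => exact ⟨b1, bt, rfl⟩
        unfold pvOutN
        rw [hb, List.tail_cons]
        conv_lhs => rw [hbt, List.map_cons]
        rw [List.zip_cons_cons, List.map_cons]
        have hm : (b1 + 1) :: (bt.map (· + 1)) = (b1 :: bt).map (· + 1) := by simp
        rw [hm, pvZipShift, ← hbt, List.map_map]
        have hslices : ((pvBoundsN g (c' :: rest)).tail.zip bt).map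
              ((fun ab => ((c :: c' :: rest).drop ab.1).take (ab.2 - ab.1)) ∘
                (fun ab : Nat × Nat => (ab.1 + 1, ab.2 + 1))) =
            ((pvBoundsN g (c' :: rest)).tail.zip bt).map
              (fun ab => ((c' :: rest).drop ab.1).take (ab.2 - ab.1)) := by
          apply List.map_congr_left
          intro ab _
          simp
        rw [hslices]
        have hout' : pvOutN g (c' :: rest) =
            ((c' :: rest).take b1) ::
              ((pvBoundsN g (c' :: rest)).tail.zip bt).map
                (fun ab => ((c' :: rest).drop ab.1).take (ab.2 - ab.1)) := by
          unfold pvOutN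
          conv_lhs => rw [hbz, List.tail_cons, hbt]
          rw [List.zip_cons_cons, List.map_cons, ← hbt]
          simp
        obtain ⟨t, cls, hgrp'⟩ := pvGrp_head g rest c'
        have hih := ih (by simp)
        rw [hout', hgrp'] at hih
        injection hih with h1 h2
        rw [h2]
        have hfirst : ((c :: c' :: rest).drop 0).take (b1 + 1 - 0) = c :: (c' :: rest).take b1 := by
          simp
        rw [hfirst, h1]
        simp [pvGrp, hg, hgrp']

lemma pvAlt_eq_outN (g : Int) (l : List (List (String × Int))) :
    ((0 :: (PySem.List.pyRange 1 (l.length : Int) 1).filter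
        (fun i => decide (pvKey (PySem.List.pyGetD l i []) -
                          pvKey (PySem.List.pyGetD l (i - 1) []) > g)) ++ [(l.length : Int)]).zip
      ((0 :: (PySem.List.pyRange 1 (l.length : Int) 1).filter
        (fun i => decide (pvKey (PySem.List.pyGetD l i []) -
                          pvKey (PySem.List.pyGetD l (i - 1) []) > g)) ++ [(l.length : Int)])).tail).map
      (fun ab => PySem.List.slice l (some ab.1) (some ab.2)) = pvOutN g l := by
  have hrange : PySem.List.pyRange 1 (l.length : Int) 1 =
      (List.range (l.length - 1)).map (fun k => ((k + 1 : Nat) : Int)) := by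
    rw [PySem.List.pyRange_one]
    have h1 : ((l.length : Int) - 1).toNat = l.length - 1 := by omega
    rw [h1]
    apply List.map_congr_left
    intro k _
    push_cast
    ring
  have hfilter : (PySem.List.pyRange 1 (l.length : Int) 1).filter
        (fun i => decide (pvKey (PySem.List.pyGetD l i []) -
                          pvKey (PySem.List.pyGetD l (i - 1) []) > g)) =
      (pvBrkN g l).map (fun k => ((k + 1 : Nat) : Int)) := by
    rw [hrange, List.filter_map]
    unfold pvBrkN
    congr 1
    apply List.filter_congr
    intro k _
    simp only [Function.comp_apply]
    have h1 : ((k + 1 : Nat) : Int) - 1 = ((k : Nat) : Int) := by push_cast; ring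
    rw [h1, PySem.List.pyGetD_natCast, PySem.List.pyGetD_natCast]
    simp [pvQ, List.getD]
  have hbounds : (0 :: (PySem.List.pyRange 1 (l.length : Int) 1).filter
        (fun i => decide (pvKey (PySem.List.pyGetD l i []) -
                          pvKey (PySem.List.pyGetD l (i - 1) []) > g)) ++ [(l.length : Int)]) =
      (pvBoundsN g l).map (fun a => ((a : Nat) : Int)) := by
    rw [hfilter]
    simp only [pvBoundsN, List.map_cons, List.map_append, List.map_map, Function.comp_def,
      List.map_cons, List.map_nil]
    norm_num
  rw [hbounds]
  have htail : ((pvBoundsN g l).map (fun a => ((a : Nat) : Int))).tail =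
      (pvBoundsN g l).tail.map (fun a => ((a : Nat) : Int)) := by
    cases pvBoundsN g l <;> simp
  rw [htail, List.zip_map]
  rw [List.map_map]
  unfold pvOutN
  apply List.map_congr_left
  intro ab _
  simp only [Function.comp_apply, Prod.map]
  rw [PySem.List.slice_natCast]

-- ===== VERDICT (by name: the statement is the Claim_ definition above) =====
theorem cluster_row_cells_spec : Claim_equal_cluster_row_cells := by
  intro cells min_gap _ _
  unfold Spec_cluster_row_cells cluster_row_cells cluster_row_cells_alt
  rw [pvA_eq_grp]
  by_cases h : PySem.List.sorted cells pvKey false = []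
  · simp [h, pvGrp]
  · simp only [if_neg h]
    rw [pvAlt_eq_outN min_gap _, pvOutN_eq_grp min_gap _ h]
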